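-- pv_equiv track=rewrite | github.com/angary/tutoring | wk07/fettucine.py | calc
-- ===== SOURCE A (Python) =====
-- def generateNumber(i):
--     return (i * (3 + i)) * (1 if i % 2 == 0 else -1)
--
-- def calc(m):
--     retStr = ""
--
--     nums = []
--     for i in range(m):
--         nums.append(generateNumber(i))
--
--     middleIndex = int(m/2 - 0.5)
--     middle = nums[middleIndex]
--
--     retStr += "Middle item: "
--     retStr += str(middle)
--     retStr += "\n"
--
--     min = 99999999
--     max = -99999999
--
--     for i in range(m):
--         if nums[i] < min:
--             min = nums[i]
--         if nums[i] > max: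
--             max = nums[i]
--
--     retStr += "Min item: "
--     retStr += str(min)
--     retStr += "\n"
--     retStr += "Max item: "
--     retStr += str(max)
--     retStr += "\n"
--
--     s = 0
--     for i in range(m):
--         s += nums[i]
--
--     retStr += "Sum: "
--     retStr += str(s)
--     retStr += "\n"
--     return retStr
-- ===== SOURCE B (Python) =====
-- # O(1) closed-form re-implementation: direct middle access, extremes at the
-- # largest even/odd indices, and a closed-form alternating polynomial sum.
-- def calc(m):
--     mi = (m - 1) // 2
--     middle = mi * (3 + mi) * (1 if mi % 2 == 0 else -1)
--     e = m - 1 if (m - 1) % 2 == 0 else m - 2          # largest even index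
--     mx = e * (e + 3)
--     if m >= 2:
--         o = m - 1 if (m - 1) % 2 == 1 else m - 2      # largest odd index
--         mn = -(o * (o + 3))
--     else:
--         mn = 0
--     p = m // 2
--     s = -(2 * p * p + 2 * p) + ((m - 1) * (m + 2) if m % 2 == 1 else 0)
--     return ("Middle item: " + str(middle) + "\n" +
--             "Min item: " + str(mn) + "\n" +
--             "Max item: " + str(mx) + "\n" +
--             "Sum: " + str(s) + "\n")
-- ===== Notes on version B (the rewrite author's own statement) =====
-- stated objective: faster
-- what changed: Replaced A's O(m) list construction and three loops by O(1) closed forms: the middle element is computed directly from its index, min/max come from the sequence values at the largest odd/even indices, and the sum uses a closed-form polynomial for the alternating series.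
-- outside the precondition, e.g. on calc(0): A raises IndexError, B returns 'Middle item: 2\nMin item: 0\nMax item: -2\nSum: 0\n'
import Mathlib
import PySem

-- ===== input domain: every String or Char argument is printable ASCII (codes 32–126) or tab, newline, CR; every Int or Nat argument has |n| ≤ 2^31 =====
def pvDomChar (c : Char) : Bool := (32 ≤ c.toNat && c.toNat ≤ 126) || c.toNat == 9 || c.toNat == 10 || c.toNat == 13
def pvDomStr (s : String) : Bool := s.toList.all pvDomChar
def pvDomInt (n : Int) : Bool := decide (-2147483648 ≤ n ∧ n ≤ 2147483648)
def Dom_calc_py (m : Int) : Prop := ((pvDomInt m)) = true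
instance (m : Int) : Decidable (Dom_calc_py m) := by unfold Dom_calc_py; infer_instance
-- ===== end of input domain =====

-- B replaces A's three O(m) loops by O(1) closed forms (direct middle access,
-- extremes at the largest even/odd indices, closed-form alternating sum); objective: faster.


-- ===== PORT A =====
def generateNumber (i : Int) : Int :=
  (i * (3 + i)) * (if PySem.Int.mod i 2 == 0 then 1 else -1)

def calc_py (m : Int) : String :=
  let nums : List Int :=
    (PySem.List.pyRange 0 m).foldl (fun acc i => acc ++ [generateNumber i]) []
  -- int(m/2 - 0.5): exact float arithmetic on Dom gives (m-1)//2 for m ≥ 1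
  -- (m ≤ 0 raises IndexError on the access below and is excluded by Pre_)
  let middleIndex := PySem.Int.floordiv (m - 1) 2
  let middle := PySem.List.pyGetD nums middleIndex 0  -- nums[middleIndex]; IndexError excluded by Pre_
  let retStr := "" ++ "Middle item: " ++ PySem.Int.toStr middle ++ "\n"
  let mm := (PySem.List.pyRange 0 m).foldl
      (fun (p : Int × Int) i =>
        let v := PySem.List.pyGetD nums i 0   -- i always in range here
        (if v < p.1 then v else p.1, if v > p.2 then v else p.2))
      (99999999, -99999999)
  let retStr := retStr ++ "Min item: " ++ PySem.Int.toStr mm.1 ++ "\n"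
      ++ "Max item: " ++ PySem.Int.toStr mm.2 ++ "\n"
  let s := (PySem.List.pyRange 0 m).foldl
      (fun acc i => acc + PySem.List.pyGetD nums i 0) 0
  retStr ++ "Sum: " ++ PySem.Int.toStr s ++ "\n"

-- ===== PORT B =====
def calc_py_alt (m : Int) : String :=
  let mi := PySem.Int.floordiv (m - 1) 2
  let middle := mi * (3 + mi) * (if PySem.Int.mod mi 2 == 0 then 1 else -1)
  let e := if PySem.Int.mod (m - 1) 2 == 0 then m - 1 else m - 2
  let mx := e * (e + 3)
  let mn := if m ≥ 2 then
      (let o := if PySem.Int.mod (m - 1) 2 == 1 then m - 1 else m - 2;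
       -(o * (o + 3)))
    else 0
  let p := PySem.Int.floordiv m 2
  let s := -(2 * p * p + 2 * p) +
      (if PySem.Int.mod m 2 == 1 then (m - 1) * (m + 2) else 0)
  "Middle item: " ++ PySem.Int.toStr middle ++ "\n"
    ++ "Min item: " ++ PySem.Int.toStr mn ++ "\n"
    ++ "Max item: " ++ PySem.Int.toStr mx ++ "\n"
    ++ "Sum: " ++ PySem.Int.toStr s ++ "\n"

-- ===== PRECONDITION & SPEC =====
-- Pre_ excludes m ≤ 0, on which A raises IndexError (nums is empty, nums[middleIndex] fails).
def Pre_calc_py (m : Int) : Prop := 1 ≤ m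
instance (m : Int) : Decidable (Pre_calc_py m) := by unfold Pre_calc_py; infer_instance
def pvWitness_calc_py : Int := (5)

def Spec_calc_py (m : Int) (out : String) : Prop := out = calc_py_alt m
instance (m : Int) (out : String) : Decidable (Spec_calc_py m out) := by unfold Spec_calc_py; infer_instance

-- ===== CLAIM (what is proved, stated in full; the proofs are below) =====
def Claim_equal_calc_py : Prop := ∀ (m : Int), Dom_calc_py m → Pre_calc_py m → Spec_calc_py m (calc_py m)

-- ===== LEMMAS AND PROOFS =====

-- the sequence value at a natural index
def gN (k : Nat) : Int := generateNumber (k : Int)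

lemma gN_eq (k : Nat) :
    gN k = if k % 2 = 0 then (k : Int) * (3 + k) else -((k : Int) * (3 + k)) := by
  unfold gN generateNumber
  rw [PySem.Int.mod_eq_emod_of_pos (by norm_num)]
  have h : ((k : Int)) % 2 = ((k % 2 : Nat) : Int) := by push_cast; ring
  rcases Nat.mod_two_eq_zero_or_one k with hk | hk
  · simp [h, hk]
  · simp [h, hk]

-- closed forms (as functions of the natural length)
def minI (n : Nat) : Int :=
  if 2 ≤ n then
    (if (n - 1) % 2 = 1 then -(((n : Int) - 1) * ((n : Int) + 2))
     else -(((n : Int) - 2) * ((n : Int) + 1)))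
  else 0

def maxI (n : Nat) : Int :=
  if (n - 1) % 2 = 0 then ((n : Int) - 1) * ((n : Int) + 2)
  else ((n : Int) - 2) * ((n : Int) + 1)

def sumI (n : Nat) : Int :=
  -(2 * ((n / 2 : Nat) : Int) * ((n / 2 : Nat) : Int) + 2 * ((n / 2 : Nat) : Int)) +
    (if n % 2 = 1 then ((n : Int) - 1) * ((n : Int) + 2) else 0)

lemma minmax_fold (n : Nat) (h : 1 ≤ n) :
    (List.range n).foldl
      (fun (p : Int × Int) i =>
        (if gN i < p.1 then gN i else p.1, if gN i > p.2 then gN i else p.2))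
      (99999999, -99999999) = (minI n, maxI n) := by
  induction n with
  | zero => omega
  | succ k ih =>
    rw [List.range_succ, List.foldl_append, List.foldl_cons, List.foldl_nil]
    rcases Nat.lt_or_ge k 1 with hk | hk
    · interval_cases k
      simp [gN_eq, minI, maxI]
    · rw [ih hk]
      have hkc : (1 : Int) ≤ (k : Int) := by exact_mod_cast hk
      rcases Nat.mod_two_eq_zero_or_one k with hp | hp
      · -- new index k is even: value is nonneg, updates max, not min
        have hv : gN k = (k : Int) * (3 + k) := by rw [gN_eq, hp]; norm_num
        rcases Nat.lt_or_ge k 2 with hk2 | hk2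
        · omega
        · have hk2c : (2 : Int) ≤ (k : Int) := by exact_mod_cast hk2
          have hmin : minI k = -(((k : Int) - 1) * ((k : Int) + 2)) := by
            unfold minI
            have : (k - 1) % 2 = 1 := by omega
            simp [hk2, this]
          have hmax : maxI k = ((k : Int) - 2) * ((k : Int) + 1) := by
            unfold maxI
            have : ¬ (k - 1) % 2 = 0 := by omega
            simp [this]
          have h1 : ¬ gN k < minI k := by
            rw [hv, hmin]
            nlinarith
          have h2 : maxI k < gN k := by
            rw [hv, hmax]; nlinarith
          have hmin' : minI (k + 1) = minI k := by
            simp only [minI]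
            rw [if_pos (show 2 ≤ k + 1 by omega), if_neg (show ¬ (k + 1 - 1) % 2 = 1 by omega),
              if_pos hk2, if_pos (show (k - 1) % 2 = 1 by omega)]
            push_cast; ring
          have hmax' : maxI (k + 1) = gN k := by
            simp only [maxI]
            rw [if_pos (show (k + 1 - 1) % 2 = 0 by omega), hv]
            push_cast; ring
          simp only [h1, if_false, if_pos h2, hmin', hmax']
      · -- new index k is odd: value is negative, updates min, not max
        have hv : gN k = -((k : Int) * (3 + k)) := by rw [gN_eq, hp]; norm_num
        have hmax : maxI k = ((k : Int) - 1) * ((k : Int) + 2) := by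
          unfold maxI
          have : (k - 1) % 2 = 0 := by omega
          simp [this]
        have h1 : gN k < minI k := by
          unfold minI
          rcases Nat.lt_or_ge k 2 with hk2 | hk2
          · interval_cases k
            norm_num [hv, minI]
          · have hk2c : (2 : Int) ≤ (k : Int) := by exact_mod_cast hk2
            have e3 : ¬ (k - 1) % 2 = 1 := by omega
            simp only [hk2, if_true, if_neg e3, hv]
            nlinarith
        have h2 : ¬ maxI k < gN k := by
          rw [hv, hmax]; nlinarith
        have hmin' : minI (k + 1) = gN k := by
          simp only [minI]
          rw [if_pos (show 2 ≤ k + 1 by omega), if_pos (show (k + 1 - 1) % 2 = 1 by omega), hv]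
          push_cast; ring
        have hmax' : maxI (k + 1) = maxI k := by
          simp only [maxI]
          rw [if_neg (show ¬ (k + 1 - 1) % 2 = 0 by omega), if_pos (show (k - 1) % 2 = 0 by omega)]
          push_cast; ring
        simp only [if_pos h1, h2, if_false, hmin', hmax']

lemma sum_fold (n : Nat) :
    (List.range n).foldl (fun acc i => acc + gN i) 0 = sumI n := by
  induction n with
  | zero => simp [sumI]
  | succ k ih =>
    rw [List.range_succ, List.foldl_append, List.foldl_cons, List.foldl_nil, ih]
    unfold sumI
    rcases Nat.mod_two_eq_zero_or_one k with hp | hp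
    · have hv : gN k = (k : Int) * (3 + k) := by rw [gN_eq, hp]; norm_num
      have e1 : (k + 1) % 2 = 1 := by omega
      have e2 : (k + 1) / 2 = k / 2 := by omega
      rw [hv, if_neg (show ¬ k % 2 = 1 by omega), if_pos e1, e2]
      push_cast
      ring
    · have hv : gN k = -((k : Int) * (3 + k)) := by rw [gN_eq, hp]; norm_num
      have e1 : (k + 1) % 2 = 0 := by omega
      have e2 : (k + 1) / 2 = k / 2 + 1 := by omega
      have e3 : ((k / 2 : Nat) : Int) * 2 = (k : Int) - 1 := by
        have := Nat.div_add_mod k 2; push_cast; omega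
      rw [hv, if_pos hp, if_neg (show ¬ (k + 1) % 2 = 1 by omega), e2]
      push_cast at e3 ⊢
      linear_combination 2 * e3

-- A's nums list in closed form
lemma nums_eq (n : Nat) :
    (PySem.List.pyRange 0 (n : Int)).foldl (fun acc i => acc ++ [generateNumber i]) []
      = (List.range n).map gN := by
  rw [PySem.List.pyRange_zero_natCast, PySem.List.foldl_append_singleton_eq_map,
    List.map_map]
  rfl

lemma getD_nums (n i : Nat) (hi : i < n) :
    PySem.List.pyGetD ((List.range n).map gN) (i : Int) 0 = gN i := by
  rw [PySem.List.pyGetD_natCast, PySem.List.getD_map_range _ _ _ _ hi]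

-- ===== VERDICT (by name: the statement is the Claim_ definition above) =====
theorem calc_py_spec : Claim_equal_calc_py := by
  intro m _hdom hpre
  unfold Spec_calc_py
  unfold Pre_calc_py at hpre
  obtain ⟨n, rfl⟩ : ∃ n : Nat, m = (n : Int) :=
    ⟨m.toNat, by omega⟩
  have hn : 1 ≤ n := by exact_mod_cast hpre
  have hmi : PySem.Int.floordiv ((n : Int) - 1) 2 = (((n - 1) / 2 : Nat) : Int) := by
    rw [PySem.Int.floordiv_eq_ediv_of_pos (by norm_num)]
    omega
  have hmodc : ∀ k : Nat, PySem.Int.mod ((k : Int)) 2 = ((k % 2 : Nat) : Int) := by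
    intro k
    rw [PySem.Int.mod_eq_emod_of_pos (by norm_num)]
    push_cast; ring
  have hcast1 : ((n : Int) - 1) = ((n - 1 : Nat) : Int) := by omega
  simp only [calc_py, calc_py_alt]
  rw [nums_eq n]
  -- A's middle element
  have hlt : (n - 1) / 2 < n := by omega
  have hmid : PySem.List.pyGetD ((List.range n).map gN)
      (PySem.Int.floordiv ((n : Int) - 1) 2) 0 = gN ((n - 1) / 2) := by
    rw [hmi]; exact getD_nums n _ hlt
  rw [hmid]
  -- A's min/max fold
  have hmm : (PySem.List.pyRange 0 (n : Int)).foldl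
      (fun (p : Int × Int) i =>
        (if PySem.List.pyGetD ((List.range n).map gN) i 0 < p.1 then
            PySem.List.pyGetD ((List.range n).map gN) i 0 else p.1,
         if PySem.List.pyGetD ((List.range n).map gN) i 0 > p.2 then
            PySem.List.pyGetD ((List.range n).map gN) i 0 else p.2))
      (99999999, -99999999) = (minI n, maxI n) := by
    rw [PySem.List.pyRange_zero_natCast, List.foldl_map]
    rw [PySem.List.foldl_congr_mem _ _
      (fun (p : Int × Int) (i : Nat) =>
        (if gN i < p.1 then gN i else p.1, if gN i > p.2 then gN i else p.2)) _
      (by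
        intro acc x hx
        have hx' : x < n := List.mem_range.mp hx
        simp only [getD_nums n x hx'])]
    exact minmax_fold n hn
  rw [hmm]
  -- A's sum fold
  have hs : (PySem.List.pyRange 0 (n : Int)).foldl
      (fun acc i => acc + PySem.List.pyGetD ((List.range n).map gN) i 0) 0 = sumI n := by
    rw [PySem.List.pyRange_zero_natCast, List.foldl_map]
    rw [PySem.List.foldl_congr_mem _ _ (fun (acc : Int) (i : Nat) => acc + gN i) _
      (by
        intro acc x hx
        have hx' : x < n := List.mem_range.mp hx
        simp only [getD_nums n x hx'])]
    exact sum_fold n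
  rw [hs]
  -- B's middle value
  have hBmid : (PySem.Int.floordiv ((n : Int) - 1) 2) *
      (3 + PySem.Int.floordiv ((n : Int) - 1) 2) *
      (if PySem.Int.mod (PySem.Int.floordiv ((n : Int) - 1) 2) 2 == 0 then 1 else -1)
      = gN ((n - 1) / 2) := by
    rw [hmi]; rfl
  -- B's max value (with the shared binding for e zeta-expanded)
  have hBmax : ((if PySem.Int.mod ((n : Int) - 1) 2 == 0 then (n : Int) - 1 else (n : Int) - 2) *
      ((if PySem.Int.mod ((n : Int) - 1) 2 == 0 then (n : Int) - 1 else (n : Int) - 2) + 3))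
      = maxI n := by
    simp only [maxI]
    rcases Nat.mod_two_eq_zero_or_one (n - 1) with hp | hp
    · have hc : (PySem.Int.mod ((n : Int) - 1) 2 == 0) = true := by
        rw [hcast1, hmodc, hp]; rfl
      rw [if_pos hc, if_pos hp]; ring
    · have hc : ¬ ((PySem.Int.mod ((n : Int) - 1) 2 == 0) = true) := by
        rw [hcast1, hmodc, hp]; decide
      rw [if_neg hc, if_neg (show ¬ (n - 1) % 2 = 0 by omega)]; ring
  -- B's min value
  have hBmin : (if (n : Int) ≥ 2 then
        -((if PySem.Int.mod ((n : Int) - 1) 2 == 1 then (n : Int) - 1 else (n : Int) - 2) *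
          ((if PySem.Int.mod ((n : Int) - 1) 2 == 1 then (n : Int) - 1 else (n : Int) - 2) + 3))
      else 0) = minI n := by
    simp only [minI]
    by_cases h2 : 2 ≤ n
    · have h2' : ((n : Int) ≥ 2) := by exact_mod_cast h2
      rw [if_pos h2', if_pos h2]
      rcases Nat.mod_two_eq_zero_or_one (n - 1) with hp | hp
      · have hc : ¬ ((PySem.Int.mod ((n : Int) - 1) 2 == 1) = true) := by
          rw [hcast1, hmodc, hp]; decide
        rw [if_neg hc, if_neg (show ¬ (n - 1) % 2 = 1 by omega)]; ring
      · have hc : (PySem.Int.mod ((n : Int) - 1) 2 == 1) = true := by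
          rw [hcast1, hmodc, hp]; rfl
        rw [if_pos hc, if_pos hp]; ring
    · have hn1 : n = 1 := by omega
      subst hn1
      norm_num
  -- B's sum value
  have hBsum : -(2 * PySem.Int.floordiv (n : Int) 2 * PySem.Int.floordiv (n : Int) 2
        + 2 * PySem.Int.floordiv (n : Int) 2) +
      (if PySem.Int.mod (n : Int) 2 == 1 then ((n : Int) - 1) * ((n : Int) + 2) else 0)
      = sumI n := by
    simp only [sumI]
    have hd : PySem.Int.floordiv (n : Int) 2 = ((n / 2 : Nat) : Int) := by
      rw [PySem.Int.floordiv_eq_ediv_of_pos (by norm_num)]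
      omega
    rw [hd]
    rcases Nat.mod_two_eq_zero_or_one n with hp | hp
    · have hc : ¬ ((PySem.Int.mod (n : Int) 2 == 1) = true) := by
        rw [hmodc, hp]; decide
      rw [if_neg hc, if_neg (show ¬ n % 2 = 1 by omega)]
    · have hc : (PySem.Int.mod (n : Int) 2 == 1) = true := by
        rw [hmodc, hp]; rfl
      rw [if_pos hc, if_pos hp]
  rw [hBmid, hBmax, hBmin, hBsum,
    show ("" ++ "Middle item: " : String) = "Middle item: " from rfl]
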